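-- pv_equiv track=rewrite | github.com/SRI-AIC/imago | src/imago/perturb/cfs/instance_based.py | _valid_threepts
-- ===== SOURCE A (Python) =====
-- def _valid_threepts(valid_cf_isnts):
--     """
--     Retain first, middle, last
--     """
--     if len(valid_cf_isnts) <= 3:
--         return valid_cf_isnts
--     midpt = len(valid_cf_isnts) // 2
--     res = []
--     for idx, ninst in enumerate(valid_cf_isnts):
--         if idx == 0 or idx == midpt or idx == (len(valid_cf_isnts) - 1):
--             res.append(ninst)
--     assert len(res) == 3
--     return res
-- ===== SOURCE B (Python) =====
-- def _valid_threepts(valid_cf_isnts):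
--     """
--     Retain first, middle, last
--     """
--     if len(valid_cf_isnts) <= 3:
--         return valid_cf_isnts
--     return [valid_cf_isnts[0],
--             valid_cf_isnts[len(valid_cf_isnts) // 2],
--             valid_cf_isnts[-1]]
-- ===== Notes on version B (the rewrite author's own statement) =====
-- stated objective: simpler
-- what changed: Replaced the full enumerate scan that tests every index against 0/mid/last with direct indexing of the three target positions.
import Mathlib
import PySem

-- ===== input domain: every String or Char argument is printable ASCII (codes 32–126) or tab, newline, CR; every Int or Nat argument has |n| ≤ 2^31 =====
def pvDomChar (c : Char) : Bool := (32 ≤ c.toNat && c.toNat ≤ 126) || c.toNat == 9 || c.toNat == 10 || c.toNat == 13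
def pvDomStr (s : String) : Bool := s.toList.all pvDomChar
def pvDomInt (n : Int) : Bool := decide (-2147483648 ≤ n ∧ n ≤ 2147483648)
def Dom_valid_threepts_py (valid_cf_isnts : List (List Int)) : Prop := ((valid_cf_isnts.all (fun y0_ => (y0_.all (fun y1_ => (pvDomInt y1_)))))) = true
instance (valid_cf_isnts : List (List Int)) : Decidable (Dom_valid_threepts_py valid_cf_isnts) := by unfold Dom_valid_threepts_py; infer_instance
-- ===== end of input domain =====

-- B keeps the `≤ 3` branch and otherwise indexes the first/middle/last positions
-- directly instead of scanning every element (objective: simpler).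

-- ===== PORT A =====
def valid_threepts_py (valid_cf_isnts : List (List Int)) : List (List Int) :=
  if valid_cf_isnts.length ≤ 3 then valid_cf_isnts
  else
    let midpt : Int := PySem.Int.floordiv (valid_cf_isnts.length : Int) 2
    (PySem.List.enumerate valid_cf_isnts 0).foldl
      (fun res p =>
        if p.1 = 0 ∨ p.1 = midpt ∨ p.1 = (valid_cf_isnts.length : Int) - 1
        then res ++ [p.2] else res) []

-- ===== PORT B =====
def valid_threepts_py_alt (valid_cf_isnts : List (List Int)) : List (List Int) :=
  if valid_cf_isnts.length ≤ 3 then valid_cf_isnts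
  else
    [PySem.List.pyGetD valid_cf_isnts 0 [],
     PySem.List.pyGetD valid_cf_isnts (PySem.Int.floordiv (valid_cf_isnts.length : Int) 2) [],
     PySem.List.pyGetD valid_cf_isnts (-1) []]

-- ===== PRECONDITION & SPEC =====
def Spec_valid_threepts_py (valid_cf_isnts : List (List Int)) (out : List (List Int)) : Prop := out = valid_threepts_py_alt valid_cf_isnts
instance (valid_cf_isnts : List (List Int)) (out : List (List Int)) : Decidable (Spec_valid_threepts_py valid_cf_isnts out) := by unfold Spec_valid_threepts_py; infer_instance

-- ===== CLAIM (what is proved, stated in full; the proofs are below) =====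
def Claim_equal_valid_threepts_py : Prop := ∀ (valid_cf_isnts : List (List Int)), Dom_valid_threepts_py valid_cf_isnts → Spec_valid_threepts_py valid_cf_isnts (valid_threepts_py valid_cf_isnts)

-- ===== LEMMAS AND PROOFS =====


theorem pv_filter_nil {P : Int → Prop} [DecidablePred P] (a b : Int)
    (h : ∀ x, a ≤ x → x < b → ¬ P x) :
    (PySem.List.pyRange a b 1).filter (fun j => decide (P j)) = [] := by
  apply List.filter_eq_nil_iff.mpr
  intro x hx
  rw [PySem.List.mem_pyRange_one] at hx
  simpa using h x hx.1 hx.2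

theorem pv_range_filter_three (n m : Int) (h0 : 0 < m) (h1 : m < n - 1) :
    (PySem.List.pyRange 0 n 1).filter
      (fun j => decide (j = 0 ∨ j = m ∨ j = n - 1)) = [0, m, n - 1] := by
  have hs := PySem.List.pyRange_one_singleton (a := n - 1)
  rw [show (n - 1) + 1 = n by ring] at hs
  rw [PySem.List.pyRange_one_append 0 m n (by omega) (by omega),
      PySem.List.pyRange_one_cons (a := 0) (b := m) (by omega),
      PySem.List.pyRange_one_cons (a := m) (b := n) (by omega),
      PySem.List.pyRange_one_append (m + 1) (n - 1) n (by omega) (by omega)]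
  simp only [List.cons_append, List.filter_append, List.filter_cons, hs]
  rw [pv_filter_nil (P := fun j => j = 0 ∨ j = m ∨ j = n - 1) (0 + 1) m (by omega),
      pv_filter_nil (P := fun j => j = 0 ∨ j = m ∨ j = n - 1) (m + 1) (n - 1) (by omega)]
  simp

-- ===== VERDICT (by name: the statement is the Claim_ definition above) =====
theorem valid_threepts_py_spec : Claim_equal_valid_threepts_py := by
  intro l _
  unfold Spec_valid_threepts_py valid_threepts_py valid_threepts_py_alt
  by_cases h : l.length ≤ 3
  · simp [h]
  · simp only [h, if_false]
    have h4 : 3 < l.length := by omega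
    have hmid : PySem.Int.floordiv (l.length : Int) 2 = (l.length : Int) / 2 :=
      PySem.Int.floordiv_eq_ediv_of_pos (by omega)
    set g : Int → List Int := fun j => PySem.List.pyGetD l j [] with hg
    rw [PySem.List.enumerate_eq_map_pyRange (d := ([] : List Int)), List.foldl_map]
    rw [show (fun (x : List (List Int)) (y : Int) =>
        if (y, g y).1 = 0 ∨ (y, g y).1 = PySem.Int.floordiv (l.length : Int) 2 ∨
            (y, g y).1 = (l.length : Int) - 1
        then x ++ [(y, g y).2] else x)
      = (fun (x : List (List Int)) (y : Int) =>
        if y = 0 ∨ y = PySem.Int.floordiv (l.length : Int) 2 ∨ y = (l.length : Int) - 1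
        then x ++ [g y] else x) from rfl]
    rw [PySem.List.foldl_append_ite
          (p := fun y : Int => y = 0 ∨ y = PySem.Int.floordiv (l.length : Int) 2 ∨ y = (l.length : Int) - 1)
          (f := g)]
    rw [hmid, show PySem.List.len l = (l.length : Int) from PySem.List.len_eq l,
        pv_range_filter_three (l.length : Int) ((l.length : Int) / 2) (by omega) (by omega)]
    simp only [List.nil_append, List.map_cons, List.map_nil, hg]
    have hlast : PySem.List.pyGetD l ((l.length : Int) - 1) ([] : List Int)
        = PySem.List.pyGetD l (-1) ([] : List Int) := by
      have hne : l ≠ [] := by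
        intro e
        rw [e] at h4
        simp at h4
      rw [PySem.List.pyGetD_neg_one l ([] : List Int) hne,
          show ((l.length : Int) - 1) = ((l.length - 1 : Nat) : Int) by omega,
          PySem.List.pyGetD_natCast]
      rw [List.getLast_eq_getElem, List.getD_eq_getElem?_getD,
          List.getElem?_eq_getElem (by omega)]
      rfl
    rw [hlast]
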